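-- pv_equiv track=rewrite | github.com/coreone/aoc-2020 | day14/day14.py | generate_bitmasks
-- ===== SOURCE A (Python) =====
-- def generate_bitmasks(mask, ors=["1"], ands=["X"]):
--     """Parse the bit mask from input."""
--     maskand = 0
--     maskor = 0
--
--     power = 0
--     for index in range(len(mask) - 1, -1, -1):
--         factor = 2 ** power
--         if mask[index] in ors:  # 1
--             maskor += factor
--             maskand += factor
--         elif mask[index] in ands:  # X
--             maskand += factor
--         power += 1
--
--     return (maskand, maskor)
-- ===== SOURCE B (Python) =====
-- def generate_bitmasks(mask, ors=["1"], ands=["X"]):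
--     """Parse the bit mask from input."""
--     or_str = "".join("1" if c in ors else "0" for c in mask)
--     and_str = "".join("1" if (c in ors or c in ands) else "0" for c in mask)
--     return (int(and_str or "0", 2), int(or_str or "0", 2))
-- ===== Notes on version B (the rewrite author's own statement) =====
-- stated objective: idiomatic
-- what changed: B builds the two binary digit strings in one forward pass and delegates all positional bit-weighting to int(_, 2), instead of A's explicit backward index loop with a 2**power accumulator.
import Mathlib
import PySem

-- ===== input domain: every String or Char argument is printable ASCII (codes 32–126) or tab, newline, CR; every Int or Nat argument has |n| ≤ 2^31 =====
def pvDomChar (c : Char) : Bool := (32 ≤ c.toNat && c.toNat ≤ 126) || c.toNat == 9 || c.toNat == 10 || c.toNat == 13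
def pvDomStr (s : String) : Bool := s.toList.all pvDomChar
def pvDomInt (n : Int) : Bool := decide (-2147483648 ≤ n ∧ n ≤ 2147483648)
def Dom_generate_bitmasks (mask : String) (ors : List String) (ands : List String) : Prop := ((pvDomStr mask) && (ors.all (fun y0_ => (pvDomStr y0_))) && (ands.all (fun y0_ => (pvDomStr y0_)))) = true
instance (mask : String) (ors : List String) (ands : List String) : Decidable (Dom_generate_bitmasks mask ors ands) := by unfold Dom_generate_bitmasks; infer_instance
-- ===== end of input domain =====

-- B replaces A's backward 2**power accumulator loop by one forward pass building two
-- binary digit strings that int(_, 2) converts (objective: idiomatic; same O(n) cost).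

-- ===== PORT A =====
-- the loop state is (maskand, maskor, power); the loop body is named for reuse in the proofs
def loopBodyA (mask : String) (ors : List String) (ands : List String)
    (s : Int × Int × Nat) (index : Int) : Int × Int × Nat :=
  let factor : Int := 2 ^ s.2.2
  match PySem.Str.pyGet? mask index with
  | some c =>
      if ors.contains (String.ofList [c]) then (s.1 + factor, s.2.1 + factor, s.2.2 + 1)
      else if ands.contains (String.ofList [c]) then (s.1 + factor, s.2.1, s.2.2 + 1)
      else (s.1, s.2.1, s.2.2 + 1)
  | none => s       -- unreachable: every index produced by the range is in bounds

def generate_bitmasks (mask : String) (ors : List String) (ands : List String) : Int × Int :=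
  let r := (PySem.List.pyRange ((mask.toList.length : Int) - 1) (-1) (-1)).foldl
    (loopBodyA mask ors ands) ((0 : Int), (0 : Int), (0 : Nat))
  (r.1, r.2.1)

-- ===== PORT B =====
-- int(bits or "0", 2) for a string of '0'/'1' digits: int("0",2)=0 coincides with the
-- empty fold, so the Horner fold models the `or "0"` fallback exactly.
def pyBinVal (bits : List Char) : Int :=
  bits.foldl (fun acc c => 2 * acc + (if c = '1' then 1 else 0)) 0

def generate_bitmasks_alt (mask : String) (ors : List String) (ands : List String) : Int × Int :=
  let orStr := mask.toList.map (fun c => if ors.contains (String.ofList [c]) then '1' else '0')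
  let andStr := mask.toList.map (fun c =>
    if ors.contains (String.ofList [c]) || ands.contains (String.ofList [c]) then '1' else '0')
  (pyBinVal andStr, pyBinVal orStr)

-- ===== PRECONDITION & SPEC =====
def Spec_generate_bitmasks (mask : String) (ors : List String) (ands : List String) (out : Int × Int) : Prop := out = generate_bitmasks_alt mask ors ands
instance (mask : String) (ors : List String) (ands : List String) (out : Int × Int) : Decidable (Spec_generate_bitmasks mask ors ands out) := by unfold Spec_generate_bitmasks; infer_instance

-- ===== CLAIM (what is proved, stated in full; the proofs are below) =====
def Claim_equal_generate_bitmasks : Prop := ∀ (mask : String) (ors : List String) (ands : List String), Dom_generate_bitmasks mask ors ands → Spec_generate_bitmasks mask ors ands (generate_bitmasks mask ors ands)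

-- ===== LEMMAS AND PROOFS =====

-- Horner fold with an arbitrary initial accumulator
theorem pyBinVal_init (b : Char → Int) :
    ∀ (l : List Char) (i : Int),
      l.foldl (fun acc c => 2 * acc + b c) i
        = i * 2 ^ l.length + l.foldl (fun acc c => 2 * acc + b c) 0 := by
  intro l
  induction l with
  | nil => intro i; simp
  | cons c t ih =>
      intro i
      simp only [List.foldl_cons, List.length_cons]
      rw [ih (2 * i + b c), ih (2 * 0 + b c)]
      ring

theorem pyBinVal_cons (b : Char → Int) (c : Char) (t : List Char) :
    (c :: t).foldl (fun acc x => 2 * acc + b x) 0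
      = b c * 2 ^ t.length + t.foldl (fun acc x => 2 * acc + b x) 0 := by
  simp only [List.foldl_cons]
  rw [pyBinVal_init b t (2 * 0 + b c)]
  ring

-- folding over 'range l.length' while looking the element up equals folding over l
theorem foldl_range_getD {α β : Type} (f : β → α → β) (d : α) :
    ∀ (l : List α) (i : β),
      (List.range l.length).foldl (fun s k => f s (l.getD k d)) i = l.foldl f i := by
  intro l
  induction l with
  | nil => intro i; simp
  | cons c t ih =>
      intro i
      rw [List.length_cons, List.range_succ_eq_map, List.foldl_cons, List.foldl_map]
      simpa using ih (f i c)

-- A's loop, rephrased as a fold over the reversed character list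
def stepA (ors ands : List String) (s : Int × Int × Nat) (c : Char) : Int × Int × Nat :=
  let factor : Int := 2 ^ s.2.2
  if ors.contains (String.ofList [c]) then (s.1 + factor, s.2.1 + factor, s.2.2 + 1)
  else if ands.contains (String.ofList [c]) then (s.1 + factor, s.2.1, s.2.2 + 1)
  else (s.1, s.2.1, s.2.2 + 1)

def bitAnd (ors ands : List String) (c : Char) : Int :=
  if ors.contains (String.ofList [c]) || ands.contains (String.ofList [c]) then 1 else 0

def bitOr (ors : List String) (c : Char) : Int :=
  if ors.contains (String.ofList [c]) then 1 else 0

-- main invariant for A's loop, processed most-significant digit first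
theorem stepA_fold (ors ands : List String) :
    ∀ (cs : List Char) (a o : Int) (p : Nat),
      cs.reverse.foldl (stepA ors ands) (a, o, p)
        = (a + 2 ^ p * cs.foldl (fun acc c => 2 * acc + bitAnd ors ands c) 0,
           o + 2 ^ p * cs.foldl (fun acc c => 2 * acc + bitOr ors c) 0,
           p + cs.length) := by
  intro cs
  induction cs with
  | nil => intro a o p; simp
  | cons c t ih =>
      intro a o p
      rw [List.reverse_cons, List.foldl_append, ih a o p,
        pyBinVal_cons (bitAnd ors ands) c t, pyBinVal_cons (bitOr ors) c t]
      simp only [List.foldl_cons, List.foldl_nil, stepA, List.length_cons]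
      by_cases h1 : String.ofList [c] ∈ ors
      · have hba : bitAnd ors ands c = 1 := by simp [bitAnd, h1]
        have hbo : bitOr ors c = 1 := by simp [bitOr, h1]
        rw [if_pos (by simpa using h1), hba, hbo]
        simp only [Prod.mk.injEq]
        refine ⟨by ring, by ring, by omega⟩
      · by_cases h2 : String.ofList [c] ∈ ands
        · have hba : bitAnd ors ands c = 1 := by simp [bitAnd, h1, h2]
          have hbo : bitOr ors c = 0 := by simp [bitOr, h1]
          rw [if_neg (by simpa using h1), if_pos (by simpa using h2), hba, hbo]
          simp only [Prod.mk.injEq]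
          refine ⟨by ring, by ring, by omega⟩
        · have hba : bitAnd ors ands c = 0 := by simp [bitAnd, h1, h2]
          have hbo : bitOr ors c = 0 := by simp [bitOr, h1]
          rw [if_neg (by simpa using h1), if_neg (by simpa using h2), hba, hbo]
          simp only [Prod.mk.injEq]
          refine ⟨by ring, by ring, by omega⟩

-- the countdown-range lookup loop of A is the stepA fold over the reversed characters
theorem portA_eq_fold (mask : String) (ors ands : List String) :
    generate_bitmasks mask ors ands =
      ((mask.toList.reverse.foldl (stepA ors ands) (0, 0, 0)).1,
       (mask.toList.reverse.foldl (stepA ors ands) (0, 0, 0)).2.1) := by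
  have hrange : PySem.List.pyRange ((mask.toList.length : Int) - 1) (-1) (-1)
      = (List.range mask.toList.length).map (fun (k : Nat) => ((mask.toList.length : Int) - 1) - (k : Int)) := by
    have hN : (((mask.toList.length : Int) - 1) - (-1)).toNat = mask.toList.length := by omega
    rw [PySem.List.pyRange_neg_one, hN]
  have hcong : ∀ (s : Int × Int × Nat), ∀ k ∈ List.range mask.toList.length,
      loopBodyA mask ors ands s (((mask.toList.length : Int) - 1) - (k : Int))
        = stepA ors ands s (mask.toList.reverse.getD k 'x') := by
    intro s k hk
    rw [List.mem_range] at hk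
    have hidx : ((mask.toList.length : Int) - 1) - k = ((mask.toList.length - 1 - k : Nat) : Int) := by
      omega
    have hlt : mask.toList.length - 1 - k < mask.toList.length := by omega
    have hget : PySem.Str.pyGet? mask (((mask.toList.length : Int) - 1) - k)
        = some (mask.toList[mask.toList.length - 1 - k]'hlt) := by
      rw [hidx, PySem.Str.pyGet?_natCast, List.getElem?_eq_getElem hlt]
    have hrev : mask.toList.reverse.getD k 'x' = mask.toList[mask.toList.length - 1 - k]'hlt := by
      have hk' : k < mask.toList.reverse.length := by simpa using hk
      rw [List.getD_eq_getElem _ _ hk', List.getElem_reverse]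
    simp only [loopBodyA, hget, hrev, stepA]
  have hmain := PySem.List.foldl_congr_mem (List.range mask.toList.length)
    (fun (s : Int × Int × Nat) (k : Nat) => loopBodyA mask ors ands s (((mask.toList.length : Int) - 1) - (k : Int)))
    (fun (s : Int × Int × Nat) (k : Nat) => stepA ors ands s (mask.toList.reverse.getD k 'x'))
    ((0 : Int), (0 : Int), (0 : Nat)) hcong
  simp only [generate_bitmasks]
  rw [hrange, List.foldl_map, hmain]
  have hlen : mask.toList.length = mask.toList.reverse.length := by simp
  rw [show List.range mask.toList.length = List.range mask.toList.reverse.length from by rw [← hlen]]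
  rw [foldl_range_getD (stepA ors ands) 'x' mask.toList.reverse (0, 0, 0)]

-- ===== VERDICT (by name: the statement is the Claim_ definition above) =====
theorem generate_bitmasks_spec : Claim_equal_generate_bitmasks := by
  intro mask ors ands _
  unfold Spec_generate_bitmasks generate_bitmasks_alt pyBinVal
  rw [portA_eq_fold, stepA_fold ors ands mask.toList 0 0 0]
  simp only [List.foldl_map, pow_zero, one_mul, zero_add, Prod.mk.injEq]
  constructor
  · refine PySem.List.foldl_congr_mem _ _ _ _ ?_
    intro acc x _
    simp only [bitAnd]
    by_cases h1 : String.ofList [x] ∈ ors <;> by_cases h2 : String.ofList [x] ∈ ands <;>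
      simp [h1, h2]
  · refine PySem.List.foldl_congr_mem _ _ _ _ ?_
    intro acc x _
    simp only [bitOr]
    by_cases h1 : String.ofList [x] ∈ ors <;> simp [h1]
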